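-- pv_equiv track=rewrite | github.com/Veynah/Projet-SGBD | ChannelSynthesizer/src/parsers/providers/voo.py | modify_row
-- ===== SOURCE A (Python) =====
-- VOO_info_codes = {
--     "VS": "VOOsport",
--     "w VS": "VOOsport World",
--     "Pa": "Bouquet Panorama",
--     "Ci": "Option Ciné Pass",
--     "Doc": "Be Bouquet Documentaires",
--     "Div": "Be Bouquet Divertissement",
--     "Co": "Be Cool",
--     "Enf": "Be Bouquet Enfant",
--     "Sp": "Be Bouquet Sport",
--     "Sel": "Be Bouquet Selection",
--     "Inf": "Option Infos",
--     "Sen": "Option Sensation",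
--     "Ch": "Option Charme",
--     "FF": "Family Fun",
--     "DM": "Discover More",
--     "CX": "Classé X",
--     "MX": "Man-X",
-- }
--
-- def modify_row(row, section_names):
--     """
--     modifie la ligne pour garder les codes d'info VOO et les regions. si rien de valides n'est trouvé, retourne la ligne originale.
--     """
--     words = row.split()
--     filtered_words = []
--     last_valid_index = -1
--
--     for i, word in enumerate(words):
--         if word in ['G', 'W', 'B', 'F']:
--             last_valid_index = i
--             filtered_words.append(word)
--         elif word in VOO_info_codes:
--             filtered_words.append(word)  # garder les codes info VOO dans la ligne
--         else:
--             filtered_words.append(word)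
--
--     if last_valid_index != -1:
--         return " ".join(filtered_words[:last_valid_index + 1]), ""
--     else:
--         return " ".join(filtered_words), ""
-- ===== SOURCE B (Python) =====
-- VOO_info_codes = {
--     "VS": "VOOsport", "w VS": "VOOsport World", "Pa": "Bouquet Panorama",
--     "Ci": "Option Ciné Pass", "Doc": "Be Bouquet Documentaires",
--     "Div": "Be Bouquet Divertissement", "Co": "Be Cool",
--     "Enf": "Be Bouquet Enfant", "Sp": "Be Bouquet Sport",
--     "Sel": "Be Bouquet Selection", "Inf": "Option Infos",
--     "Sen": "Option Sensation", "Ch": "Option Charme", "FF": "Family Fun",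
--     "DM": "Discover More", "CX": "Classé X", "MX": "Man-X",
-- }
--
-- def modify_row(row, section_names):
--     words = row.split()
--     for i in range(len(words) - 1, -1, -1):
--         if words[i] in ('G', 'W', 'B', 'F'):
--             return " ".join(words[:i + 1]), ""
--     return " ".join(words), ""
-- ===== Notes on version B (the rewrite author's own statement) =====
-- stated objective: simpler
-- what changed: Replaces the forward loop that maintains a last_valid_index accumulator and a filtered_words copy (whose three branches all append the word unchanged) with a backward scan that stops at the first region separator from the end and slices there; the no-op VOO_info_codes branch and the rebuilt list are dropped.
import Mathlib
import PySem

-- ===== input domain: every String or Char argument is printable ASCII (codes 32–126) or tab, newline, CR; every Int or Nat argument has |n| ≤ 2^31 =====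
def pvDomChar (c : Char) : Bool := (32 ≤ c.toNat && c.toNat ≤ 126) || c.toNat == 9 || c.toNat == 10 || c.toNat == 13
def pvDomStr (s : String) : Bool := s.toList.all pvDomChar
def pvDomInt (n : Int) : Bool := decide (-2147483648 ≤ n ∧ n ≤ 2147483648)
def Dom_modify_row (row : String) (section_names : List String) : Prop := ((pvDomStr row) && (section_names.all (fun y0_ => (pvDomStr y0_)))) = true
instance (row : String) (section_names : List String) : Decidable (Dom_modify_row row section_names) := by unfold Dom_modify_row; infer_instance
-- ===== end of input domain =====

-- B replaces A's forward loop with running last_valid_index/filtered_words state by a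
-- backward scan for the first separator from the end (objective: simpler).

-- ===== PORT A =====
-- the module-level VOO_info_codes dict
def vooInfoCodes : PySem.Dict String String := PySem.Dict.ofList
  [("VS", "VOOsport"), ("w VS", "VOOsport World"), ("Pa", "Bouquet Panorama"),
   ("Ci", "Option Ciné Pass"), ("Doc", "Be Bouquet Documentaires"),
   ("Div", "Be Bouquet Divertissement"), ("Co", "Be Cool"),
   ("Enf", "Be Bouquet Enfant"), ("Sp", "Be Bouquet Sport"),
   ("Sel", "Be Bouquet Selection"), ("Inf", "Option Infos"),
   ("Sen", "Option Sensation"), ("Ch", "Option Charme"), ("FF", "Family Fun"),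
   ("DM", "Discover More"), ("CX", "Classé X"), ("MX", "Man-X")]

-- one iteration of A's loop body over (filtered_words, last_valid_index)
def modifyRowStep (st : List String × Int) (p : Int × String) : List String × Int :=
  if p.2 ∈ ["G", "W", "B", "F"] then (st.1 ++ [p.2], p.1)
  else if vooInfoCodes.contains p.2 then (st.1 ++ [p.2], st.2)
  else (st.1 ++ [p.2], st.2)

def modify_row (row : String) (section_names : List String) : String × String :=
  let words := PySem.Str.split₀ row
  let st := (PySem.List.enumerate words 0).foldl modifyRowStep ([], -1)
  if st.2 ≠ -1 then
    (PySem.Str.join " " (PySem.List.slice st.1 none (some (st.2 + 1))), "")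
  else
    (PySem.Str.join " " st.1, "")

-- ===== PORT B =====
-- scan the reversed word list; i is the original index of the head
def vooScanBack : List String → Nat → Option Nat
  | [], _ => none
  | w :: rest, i => if w ∈ ["G", "W", "B", "F"] then some i else vooScanBack rest (i - 1)

def modify_row_alt (row : String) (section_names : List String) : String × String :=
  let words := PySem.Str.split₀ row
  match vooScanBack words.reverse (words.length - 1) with
  | some i => (PySem.Str.join " " (words.take (i + 1)), "")
  | none => (PySem.Str.join " " words, "")

-- ===== PRECONDITION & SPEC =====
def Spec_modify_row (row : String) (section_names : List String) (out : String × String) : Prop := out = modify_row_alt row section_names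
instance (row : String) (section_names : List String) (out : String × String) : Decidable (Spec_modify_row row section_names out) := by unfold Spec_modify_row; infer_instance

-- ===== CLAIM (what is proved, stated in full; the proofs are below) =====
def Claim_equal_modify_row : Prop := ∀ (row : String) (section_names : List String), Dom_modify_row row section_names → Spec_modify_row row section_names (modify_row row section_names)

-- ===== LEMMAS AND PROOFS =====

-- A's loop body in components: it always appends the word; the index update is stepIdx
def stepIdx (l : Int) (p : Int × String) : Int :=
  if p.2 ∈ ["G", "W", "B", "F"] then p.1 else l

theorem modifyRowStep_eq (st : List String × Int) (p : Int × String) :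
    modifyRowStep st p = (st.1 ++ [p.2], stepIdx st.2 p) := by
  unfold modifyRowStep stepIdx; split_ifs <;> rfl

-- every branch of A's loop appends the word, so filtered_words is acc ++ words
theorem fold_fst (ps : List (Int × String)) (acc : List String) (l : Int) :
    (ps.foldl modifyRowStep (acc, l)).1 = acc ++ ps.map (·.2) := by
  induction ps generalizing acc l with
  | nil => simp
  | cons p ps ih =>
    rw [List.foldl_cons, modifyRowStep_eq, ih]
    simp

theorem fold_filtered (words : List String) :
    ((PySem.List.enumerate words 0).foldl modifyRowStep ([], -1)).1 = words := by
  rw [fold_fst]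
  simp [PySem.List.map_snd_enumerate]

-- the loop's second component does not depend on the first
theorem fold_snd_indep (ps : List (Int × String)) (a a' : List String) (l : Int) :
    (ps.foldl modifyRowStep (a, l)).2 = (ps.foldl modifyRowStep (a', l)).2 := by
  induction ps generalizing a a' l with
  | nil => rfl
  | cons p ps ih =>
    rw [List.foldl_cons, List.foldl_cons, modifyRowStep_eq, modifyRowStep_eq]
    exact ih _ _ _

-- A's last_valid_index equals B's backward scan result
theorem fold_snd_eq_scan (words : List String) :
    ((PySem.List.enumerate words 0).foldl modifyRowStep ([], -1)).2 =
      (match vooScanBack words.reverse (words.length - 1) with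
       | some i => (i : Int)
       | none => -1) := by
  induction words using List.reverseRecOn with
  | nil => rfl
  | append_singleton l w ih =>
    rw [PySem.List.enumerate_append, List.foldl_append]
    simp only [PySem.List.enumerate_cons, PySem.List.enumerate_nil, List.foldl_cons,
      List.foldl_nil, List.reverse_append, List.reverse_singleton, List.singleton_append,
      List.length_append, List.length_singleton, Nat.add_sub_cancel]
    rw [modifyRowStep_eq]
    unfold stepIdx vooScanBack
    split_ifs with h
    · simp
    · rw [fold_snd_indep _ _ [] _]
      exact ih

-- ===== VERDICT (by name: the statement is the Claim_ definition above) =====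
theorem modify_row_spec : Claim_equal_modify_row := by
  intro row section_names _
  unfold Spec_modify_row modify_row modify_row_alt
  simp only []
  rw [fold_filtered, fold_snd_eq_scan]
  cases h : vooScanBack (PySem.Str.split₀ row).reverse ((PySem.Str.split₀ row).length - 1) with
  | none => simp
  | some i =>
    have : ((i : Int)) ≠ -1 := by omega
    simp only [this, if_pos, ne_eq, not_false_iff]
    rw [PySem.List.slice_to _ (by omega : (0:Int) ≤ (i:Int) + 1)]
    norm_num
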